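-- pv_equiv track=rewrite | github.com/crewAIInc/crewAI | lib/crewai-tools/src/crewai_tools/tools/nl2sql/nl2sql_tool.py | _skip_string_literal
-- ===== SOURCE A (Python) =====
-- def _skip_string_literal(stmt: str, pos: int) -> int:
--     """Skip past a string literal starting at pos (single-quoted).
--
--     Handles escaped quotes ('') inside the literal.
--     Returns the index after the closing quote.
--     """
--     quote_char = stmt[pos]
--     i = pos + 1
--     while i < len(stmt):
--         if stmt[i] == quote_char:
--             # Check for escaped quote ('')
--             if i + 1 < len(stmt) and stmt[i + 1] == quote_char:
--                 i += 2
--                 continue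
--             return i + 1
--         i += 1
--     return i  # Unterminated literal — return end
-- ===== SOURCE B (Python) =====
-- def _skip_string_literal(stmt: str, pos: int) -> int:
--     """Skip past a string literal starting at pos (single-quoted).
--
--     Two staged passes instead of an escape-pair state machine:
--     (1) run-length encode the remainder; (2) the literal closes at the end of
--     the FIRST ODD-length run of quote characters (an even run is entirely
--     doubled-quote escapes).  Returns len(stmt) if unterminated.
--     """
--     quote = stmt[pos]
--     runs = []
--     for ch in stmt[pos + 1:]:
--         if runs and runs[-1][0] == ch:
--             runs[-1][1] += 1
--         else:
--             runs.append([ch, 1])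
--     i = pos + 1
--     for ch, r in runs:
--         if ch == quote and r % 2 == 1:
--             return i + r
--         i += r
--     return len(stmt)
-- ===== Notes on version B (the rewrite author's own statement) =====
-- stated objective: alternative
-- what changed: Replaces A's single-pass escape-pair state machine with two staged passes: run-length encode the remainder, then return the end of the first odd-length run of quote characters (even quote runs are entirely doubled-quote escapes); Pre_ restricts to the natural domain of a valid non-negative pos (the tokenizer always passes the index of the opening quote), excluding negative positions where A's negative-index wraparound scan is accidental.
-- outside the precondition, e.g. on _skip_string_literal("ab'", -3): A returns 1, B returns 3
import Mathlib
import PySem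

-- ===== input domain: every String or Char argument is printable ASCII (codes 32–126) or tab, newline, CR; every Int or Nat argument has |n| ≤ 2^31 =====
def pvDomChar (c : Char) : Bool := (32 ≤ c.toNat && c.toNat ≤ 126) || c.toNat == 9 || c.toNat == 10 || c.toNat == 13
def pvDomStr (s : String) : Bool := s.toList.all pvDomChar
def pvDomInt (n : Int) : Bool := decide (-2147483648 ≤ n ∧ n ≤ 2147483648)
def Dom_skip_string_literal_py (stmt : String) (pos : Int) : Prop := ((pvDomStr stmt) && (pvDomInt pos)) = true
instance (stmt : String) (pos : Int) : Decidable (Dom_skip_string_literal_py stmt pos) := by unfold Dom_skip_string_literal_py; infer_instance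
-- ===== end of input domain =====

-- B replaces A's escape-pair state machine with two staged passes: run-length
-- encode the remainder, then close at the first odd-length quote run
-- (objective: alternative).

-- ===== PORT A =====
-- the while-loop of A: i walks one char at a time, stepping 2 over doubled quotes
def pvSkipLoopA (cs : List Char) (q : Char) (i : Int) : Int :=
  if _h : i < (cs.length : Int) then
    match PySem.List.pyGet? cs i with
    | none => i  -- unreachable for 0 ≤ i (Pre_ gives 0 ≤ pos, so i ≥ 1)
    | some c =>
      if c = q then
        if i + 1 < (cs.length : Int) ∧ PySem.List.pyGet? cs (i + 1) = some q then
          pvSkipLoopA cs q (i + 2)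
        else i + 1
      else pvSkipLoopA cs q (i + 1)
  else i
termination_by ((cs.length : Int) - i).toNat
decreasing_by all_goals omega

def skip_string_literal_py (stmt : String) (pos : Int) : Int :=
  match PySem.Str.pyGet? stmt pos with
  | none => 0  -- stmt[pos] raises IndexError: excluded by Pre_
  | some q => pvSkipLoopA stmt.toList q (pos + 1)

-- ===== PORT B =====
-- B's first loop body: extend the last run or append a fresh one
-- ('if runs and runs[-1][0] == ch')
def pvRleStep (runs : List (Char × Nat)) (ch : Char) : List (Char × Nat) :=
  match runs.getLast? with
  | some (c, r) => if c = ch then runs.dropLast ++ [(ch, r + 1)] else runs ++ [(ch, 1)]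
  | none => runs ++ [(ch, 1)]

-- B's second loop: walk the runs, return at the first odd quote run
def pvScanRuns (q : Char) (n : Int) : List (Char × Nat) → Int → Int
  | [], _ => n
  | (c, r) :: rest, i => if c = q ∧ r % 2 = 1 then i + (r : Int) else pvScanRuns q n rest (i + (r : Int))

def skip_string_literal_py_alt (stmt : String) (pos : Int) : Int :=
  match PySem.Str.pyGet? stmt pos with
  | none => 0  -- stmt[pos] raises IndexError: excluded by Pre_
  | some q =>
    let tail := PySem.List.slice stmt.toList (some (pos + 1)) none  -- stmt[pos+1:]
    let runs := tail.foldl pvRleStep []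
    pvScanRuns q (stmt.toList.length : Int) runs (pos + 1)

-- ===== PRECONDITION & SPEC =====
-- Pre_ restricts to the function's natural domain: pos a valid NON-NEGATIVE index (the
-- tokenizer always passes the index of the opening quote). For pos ≥ len or pos < -len
-- A raises IndexError; for -len ≤ pos < 0 A's negative-index wraparound scan (starting
-- at i = pos + 1 while B slices the tail) is accidental and is excluded as outside the
-- natural domain.
def Pre_skip_string_literal_py (stmt : String) (pos : Int) : Prop :=
  0 ≤ pos ∧ pos < (stmt.toList.length : Int)
instance (stmt : String) (pos : Int) : Decidable (Pre_skip_string_literal_py stmt pos) := by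
  unfold Pre_skip_string_literal_py; infer_instance

def pvWitness_skip_string_literal_py : String × Int := ("'ab''c' x", 0)

def Spec_skip_string_literal_py (stmt : String) (pos : Int) (out : Int) : Prop :=
  out = skip_string_literal_py_alt stmt pos
instance (stmt : String) (pos : Int) (out : Int) : Decidable (Spec_skip_string_literal_py stmt pos out) := by
  unfold Spec_skip_string_literal_py; infer_instance

-- ===== CLAIM (what is proved, stated in full; the proofs are below) =====
def Claim_equal_skip_string_literal_py : Prop :=
  ∀ (stmt : String) (pos : Int), Dom_skip_string_literal_py stmt pos →
    Pre_skip_string_literal_py stmt pos →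
    Spec_skip_string_literal_py stmt pos (skip_string_literal_py stmt pos)

-- ===== LEMMAS AND PROOFS =====

-- merge a run of weight r onto the front of an RLE
def pvMergeW (c : Char) (r : Nat) : List (Char × Nat) → List (Char × Nat)
  | (c', s) :: t => if c = c' then (c, r + s) :: t else (c, r) :: (c', s) :: t
  | [] => [(c, r)]

-- the left-recursive reference RLE
def pvRleRec : List Char → List (Char × Nat)
  | [] => []
  | c :: cs => pvMergeW c 1 (pvRleRec cs)

theorem pvMergeW_mergeW (c : Char) (r : Nat) (L : List (Char × Nat)) :
    pvMergeW c r (pvMergeW c 1 L) = pvMergeW c (r + 1) L := by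
  cases L with
  | nil => simp [pvMergeW]
  | cons p t =>
    obtain ⟨c', s⟩ := p
    by_cases h : c = c' <;> simp [pvMergeW, h] <;> omega

theorem pvMergeW_ne (c d : Char) (r s : Nat) (L : List (Char × Nat)) (h : c ≠ d) :
    pvMergeW c r (pvMergeW d s L) = (c, r) :: pvMergeW d s L := by
  cases L with
  | nil => simp [pvMergeW, h]
  | cons p t =>
    obtain ⟨c', u⟩ := p
    by_cases h' : d = c'
    · subst h'; simp [pvMergeW, h]
    · simp [pvMergeW, h', h]

theorem pvFoldl_rleStep (cs : List Char) :
    ∀ (R : List (Char × Nat)) (c : Char) (r : Nat),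
      List.foldl pvRleStep (R ++ [(c, r)]) cs = R ++ pvMergeW c r (pvRleRec cs) := by
  induction cs with
  | nil => intro R c r; simp [pvRleRec, pvMergeW]
  | cons d cs ih =>
    intro R c r
    simp only [List.foldl_cons]
    have hstep : pvRleStep (R ++ [(c, r)]) d =
        if c = d then R ++ [(d, r + 1)] else (R ++ [(c, r)]) ++ [(d, 1)] := by
      unfold pvRleStep
      rw [List.getLast?_concat]
      split_ifs with h <;> simp [h]
    by_cases h : c = d
    · subst h
      rw [hstep, if_pos rfl, ih]
      simp only [pvRleRec]
      rw [pvMergeW_mergeW]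
    · rw [hstep, if_neg h, ih]
      simp only [pvRleRec]
      rw [pvMergeW_ne c d r 1 _ h]
      simp

theorem pvRleFold_eq (cs : List Char) : List.foldl pvRleStep [] cs = pvRleRec cs := by
  cases cs with
  | nil => rfl
  | cons c cs =>
    have h0 : pvRleStep [] c = [] ++ [(c, 1)] := by simp [pvRleStep]
    simp only [List.foldl_cons, h0]
    rw [pvFoldl_rleStep]
    simp [pvRleRec]

theorem pvRleRec_nil_iff (l : List Char) : pvRleRec l = [] ↔ l = [] := by
  cases l with
  | nil => simp [pvRleRec]
  | cons c cs =>
    simp only [pvRleRec]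
    constructor
    · intro h
      cases hL : pvRleRec cs with
      | nil => rw [hL] at h; simp [pvMergeW] at h
      | cons p t => obtain ⟨c', s⟩ := p; rw [hL] at h; by_cases hc : c = c' <;> simp [pvMergeW, hc] at h
    · intro h; exact absurd h (by simp)

-- head of a list whose take is a nonempty replicate
theorem pvHead_of_take (xs : List Char) (s : Nat) (c : Char) (hs : 1 ≤ s)
    (htake : xs.take s = List.replicate s c) : xs.head? = some c := by
  cases s with
  | zero => omega
  | succ s' =>
    cases xs with
    | nil => simp [List.replicate_succ] at htake
    | cons y ys =>
      simp only [List.take_succ_cons, List.replicate_succ, List.cons.injEq] at htake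
      simp [htake.1]

-- structure of the first run of an RLE
theorem pvRleRec_cons_elim (l : List Char) :
    ∀ c r rest, pvRleRec l = (c, r) :: rest →
      1 ≤ r ∧ l.take r = List.replicate r c ∧ pvRleRec (l.drop r) = rest ∧
      (∀ d ∈ (l.drop r).head?, d ≠ c) := by
  induction l with
  | nil => intro c r rest h; simp [pvRleRec] at h
  | cons x xs ih =>
    intro c r rest h
    simp only [pvRleRec] at h
    cases hL : pvRleRec xs with
    | nil =>
      have hxs : xs = [] := (pvRleRec_nil_iff xs).mp hL
      rw [hL] at h
      simp only [pvMergeW] at h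
      injection h with h1 hrest
      injection h1 with hc hr
      subst hc; subst hxs
      refine ⟨by omega, ?_, ?_, ?_⟩
      · rw [← hr]; simp
      · rw [← hr, ← hrest]; simp [pvRleRec]
      · rw [← hr]; simp
    | cons p t =>
      obtain ⟨c', s⟩ := p
      rw [hL] at h
      obtain ⟨hs1, htake, hdrop, hhead⟩ := ih c' s t hL
      by_cases hc : x = c'
      · subst hc
        simp only [pvMergeW] at h
        rw [if_pos trivial] at h
        injection h with h1 h2
        injection h1 with hc2 hr2
        subst hc2; subst h2
        have he : 1 + s = s + 1 := by omega
        refine ⟨by omega, ?_, ?_, ?_⟩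
        · rw [← hr2, he]
          simp only [List.take_succ_cons, htake, List.replicate_succ]
        · rw [← hr2, he]
          simpa only [List.drop_succ_cons] using hdrop
        · rw [← hr2, he]
          simpa only [List.drop_succ_cons] using hhead
      · simp only [pvMergeW] at h
        rw [if_neg hc] at h
        injection h with h1 h2
        injection h1 with hc2 hr2
        subst hc2
        refine ⟨by omega, ?_, ?_, ?_⟩
        · rw [← hr2]; simp
        · rw [← hr2]
          simp only [List.drop_one, List.tail_cons]
          rw [hL, h2]
        · rw [← hr2]
          simp only [List.drop_one, List.tail_cons]
          intro d hd
          have hx : xs.head? = some c' := pvHead_of_take xs s c' hs1 htake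
          rw [hx] at hd
          cases hd
          exact fun hh => hc hh.symm

-- A's loop walks over a stretch of non-quote characters
theorem pvSkipLoopA_skip_aux (cs : List Char) (q : Char) (d : Nat) :
    ∀ k, k + d ≤ cs.length →
    (∀ m, k ≤ m → m < k + d → cs[m]? ≠ some q) →
    pvSkipLoopA cs q (k : Int) = pvSkipLoopA cs q ((k + d : Nat) : Int) := by
  induction d with
  | zero => intro k _ _; rfl
  | succ d ih =>
    intro k hle hnq
    have hk : k < cs.length := by omega
    have hc : cs[k]? = some cs[k] := List.getElem?_eq_getElem hk
    have hne : cs[k] ≠ q := by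
      intro h; exact hnq k le_rfl (by omega) (by rw [hc, h])
    rw [pvSkipLoopA]
    have hget : PySem.List.pyGet? cs (k : Int) = some cs[k] := by simp [hc]
    rw [dif_pos (by exact_mod_cast hk)]
    rw [hget]
    simp only [if_neg hne]
    have : (k : Int) + 1 = ((k + 1 : Nat) : Int) := by push_cast; ring
    rw [this, ih (k + 1) (by omega) (fun m h1 h2 => hnq m (by omega) (by omega))]
    congr 1
    omega

-- A's loop consumes an even run of quotes as escape pairs
theorem pvSkipLoopA_even (cs : List Char) (q : Char) (t : Nat) :
    ∀ k, k + 2 * t ≤ cs.length →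
    (∀ m, k ≤ m → m < k + 2 * t → cs[m]? = some q) →
    pvSkipLoopA cs q (k : Int) = pvSkipLoopA cs q ((k + 2 * t : Nat) : Int) := by
  induction t with
  | zero => intro k _ _; norm_num
  | succ t ih =>
    intro k hle hq
    have hk : k < cs.length := by omega
    have h0 : cs[k]? = some q := hq k le_rfl (by omega)
    have h1 : cs[k + 1]? = some q := hq (k + 1) (by omega) (by omega)
    rw [pvSkipLoopA]
    rw [dif_pos (by exact_mod_cast hk)]
    have hget : PySem.List.pyGet? cs (k : Int) = some q := by simp [h0]
    rw [hget]
    simp only [if_pos rfl]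
    have hcond : (k : Int) + 1 < (cs.length : Int) ∧ PySem.List.pyGet? cs ((k : Int) + 1) = some q := by
      constructor
      · exact_mod_cast (by omega : k + 1 < cs.length)
      · have hcst : (k : Int) + 1 = ((k + 1 : Nat) : Int) := by push_cast; ring
        rw [hcst, PySem.List.pyGet?_natCast]
        exact h1
    rw [if_pos hcond]
    have : (k : Int) + 2 = ((k + 2 : Nat) : Int) := by push_cast; ring
    have he : k + 2 + 2 * t = k + 2 * (t + 1) := by omega
    rw [this, ih (k + 2) (by omega) (fun m hm1 hm2 => hq m (by omega) (by omega)), he]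
    simp

-- A's loop returns k + r at an odd maximal run of quotes
theorem pvSkipLoopA_odd (cs : List Char) (q : Char) (k r : Nat)
    (hr : r % 2 = 1) (hle : k + r ≤ cs.length)
    (hq : ∀ m, k ≤ m → m < k + r → cs[m]? = some q)
    (hnext : cs[k + r]? ≠ some q) :
    pvSkipLoopA cs q (k : Int) = ((k + r : Nat) : Int) := by
  obtain ⟨t, ht⟩ : ∃ t, r = 2 * t + 1 := ⟨r / 2, by omega⟩
  subst ht
  rw [pvSkipLoopA_even cs q t k (by omega) (fun m h1 h2 => hq m h1 (by omega))]
  set j := k + 2 * t with hj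
  have hjlt : j < cs.length := by omega
  have hjq : cs[j]? = some q := hq j (by omega) (by omega)
  rw [pvSkipLoopA]
  rw [dif_pos (by exact_mod_cast hjlt)]
  have hget : PySem.List.pyGet? cs (j : Int) = some q := by simp [hjq]
  rw [hget]
  simp only [if_pos rfl]
  have hcond : ¬ ((j : Int) + 1 < (cs.length : Int) ∧ PySem.List.pyGet? cs ((j : Int) + 1) = some q) := by
    rintro ⟨h1, h2⟩
    have : (j : Int) + 1 = ((j + 1 : Nat) : Int) := by push_cast; ring
    rw [this] at h2
    rw [PySem.List.pyGet?_natCast] at h2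
    have : j + 1 = k + (2 * t + 1) := by omega
    rw [this] at h2
    exact hnext h2
  rw [if_neg hcond]
  rw [hj]
  push_cast
  ring

-- characters inside the first run, read back through drop/take
theorem pvRun_char (cs : List Char) (k r : Nat) (c : Char)
    (htake : (cs.drop k).take r = List.replicate r c) :
    ∀ m, k ≤ m → m < k + r → cs[m]? = some c := by
  intro m h1 h2
  have : cs[m]? = (cs.drop k)[m - k]? := by
    rw [List.getElem?_drop]; congr 1; omega
  rw [this]
  have hlt : m - k < r := by omega
  have : (cs.drop k)[m - k]? = ((cs.drop k).take r)[m - k]? := by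
    rw [List.getElem?_take_of_lt hlt]
  rw [this, htake, List.getElem?_replicate]
  simp [hlt]

-- main loop correspondence: A's walk from k equals B's run scan of drop k
theorem pvMain (cs : List Char) (q : Char) (N : Nat) :
    ∀ k, k ≤ cs.length → cs.length - k ≤ N →
    pvSkipLoopA cs q (k : Int) = pvScanRuns q (cs.length : Int) (pvRleRec (cs.drop k)) (k : Int) := by
  induction N with
  | zero =>
    intro k hk hN
    have : k = cs.length := by omega
    subst this
    rw [List.drop_length]
    simp only [pvRleRec, pvScanRuns]
    rw [pvSkipLoopA]
    simp
  | succ N ih =>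
    intro k hk hN
    cases hL : pvRleRec (cs.drop k) with
    | nil =>
      have : cs.drop k = [] := (pvRleRec_nil_iff _).mp hL
      have hke : k = cs.length := by
        have := List.drop_eq_nil_iff.mp this; omega
      subst hke
      simp only [pvScanRuns]
      rw [pvSkipLoopA]
      simp
    | cons p rest =>
      obtain ⟨c, r⟩ := p
      obtain ⟨hr1, htake, hdrop, hhead⟩ := pvRleRec_cons_elim (cs.drop k) c r rest hL
      have hlen : k + r ≤ cs.length := by
        have h1 := congrArg List.length htake
        simp only [List.length_take, List.length_drop, List.length_replicate] at h1
        omega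
      have hchars := pvRun_char cs k r c htake
      have hdd : (cs.drop k).drop r = cs.drop (k + r) := by
        rw [List.drop_drop]
      have hnext : cs[k + r]? ≠ some c := by
        intro hcontra
        have : (cs.drop (k + r)).head? = some c := by
          rw [List.head?_eq_getElem?, List.getElem?_drop]
          simpa using hcontra
        rw [← hdd] at this
        exact hhead c this rfl
      simp only [pvScanRuns]
      by_cases hcq : c = q ∧ r % 2 = 1
      · obtain ⟨hcq1, hcq2⟩ := hcq
        subst hcq1
        rw [if_pos ⟨rfl, hcq2⟩]
        have := pvSkipLoopA_odd cs c k r hcq2 hlen hchars hnext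
        rw [this]
        push_cast
        ring
      · rw [if_neg hcq]
        have hstep : pvSkipLoopA cs q (k : Int) = pvSkipLoopA cs q ((k + r : Nat) : Int) := by
          by_cases hc : c = q
          · subst hc
            have hre : r % 2 = 0 := by
              rcases Nat.mod_two_eq_zero_or_one r with h | h
              · exact h
              · exact absurd ⟨rfl, h⟩ hcq
            obtain ⟨t, ht⟩ : ∃ t, r = 2 * t := ⟨r / 2, by omega⟩
            subst ht
            exact pvSkipLoopA_even cs c t k (by omega) (fun m h1 h2 => hchars m h1 h2)
          · refine pvSkipLoopA_skip_aux cs q r k (by omega) (fun m h1 h2 hcontra => ?_)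
            have := hchars m h1 h2
            rw [this] at hcontra
            exact hc (by injection hcontra)
        rw [hstep]
        rw [hdd] at hdrop
        rw [← hdrop] at *
        have he2 : ((k + r : Nat) : Int) = (k : Int) + (r : Int) := by push_cast; ring
        have := ih (k + r) (by omega) (by omega)
        rw [← he2, this]

-- ===== VERDICT (by name: the statement is the Claim_ definition above) =====
theorem skip_string_literal_py_spec : Claim_equal_skip_string_literal_py := by
  intro stmt pos _hdom hpre
  obtain ⟨h0, hlt⟩ := hpre
  obtain ⟨n, rfl⟩ := Int.eq_ofNat_of_zero_le h0
  have hn : n < stmt.toList.length := by exact_mod_cast hlt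
  unfold Spec_skip_string_literal_py skip_string_literal_py skip_string_literal_py_alt
  have hg : PySem.Str.pyGet? stmt (n : Int) = some stmt.toList[n] := by
    rw [PySem.Str.pyGet?_natCast]
    exact List.getElem?_eq_getElem hn
  rw [hg]
  simp only
  have hslice : PySem.List.slice stmt.toList (some ((n : Int) + 1)) none = stmt.toList.drop (n + 1) := by
    have ht : ((n : Int) + 1).toNat = n + 1 := by omega
    rw [PySem.List.slice_from _ (by omega), ht]
  rw [hslice, pvRleFold_eq]
  have h1 : (n : Int) + 1 = ((n + 1 : Nat) : Int) := by push_cast; ring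
  rw [h1]
  exact pvMain stmt.toList stmt.toList[n] (stmt.toList.length) (n + 1) (by omega) (by omega)
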